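-- pv_equiv track=rewrite | github.com/vegastrike/Assets-Production | modules/PickleTools.py | stripSlashes
-- ===== SOURCE A (Python) =====
-- def stripSlashes(m):
-- 	def hexbyte(s):
-- 		def hexbyte2(c):
-- 			if ( ord(c)>=ord('0') and ord(c)<=ord('9') ):
-- 				return ord(c) - ord('0')
-- 			else:
-- 				return 10 + ord(c) - ord('a')
-- 		return ( hexbyte2(s[0])*16+hexbyte2(s[1]) ) % 256
-- 	rv = "";
-- 	i = 0
-- 	l = len(m)
-- 	while (i<l):
-- 		if (m[i]=='\\') and (i+2<l):
-- 			rv += chr( hexbyte(m[i+1:i+3]) )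
-- 			i += 3
-- 		else:
-- 			rv += m[i]
-- 			i += 1
-- 	return rv
-- ===== SOURCE B (Python) =====
-- import re
--
-- def stripSlashes(m):
--     # Regex-based: one non-overlapping left-to-right substitution pass replaces
--     # each backslash followed by two (arbitrary, DOTALL) characters with the
--     # decoded byte; a trailing backslash with fewer than two following
--     # characters does not match and stays literal, exactly like A's guard.
--     def hexbyte2(c):
--         if ord(c) >= ord('0') and ord(c) <= ord('9'):
--             return ord(c) - ord('0')
--         else:
--             return 10 + ord(c) - ord('a')
--
--     def repl(match):
--         g = match.group(1)
--         return chr((hexbyte2(g[0]) * 16 + hexbyte2(g[1])) % 256)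
--
--     return re.sub(r'\\(..)', repl, m, flags=re.DOTALL)
-- ===== Notes on version B (the rewrite author's own statement) =====
-- stated objective: faster
-- what changed: Replaces the manual index-walking while loop with quadratic string += by a single re.sub over the pattern \\(..) (DOTALL) whose replacement function decodes the two captured characters with the same non-validating hexbyte2 arithmetic.
import Mathlib
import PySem

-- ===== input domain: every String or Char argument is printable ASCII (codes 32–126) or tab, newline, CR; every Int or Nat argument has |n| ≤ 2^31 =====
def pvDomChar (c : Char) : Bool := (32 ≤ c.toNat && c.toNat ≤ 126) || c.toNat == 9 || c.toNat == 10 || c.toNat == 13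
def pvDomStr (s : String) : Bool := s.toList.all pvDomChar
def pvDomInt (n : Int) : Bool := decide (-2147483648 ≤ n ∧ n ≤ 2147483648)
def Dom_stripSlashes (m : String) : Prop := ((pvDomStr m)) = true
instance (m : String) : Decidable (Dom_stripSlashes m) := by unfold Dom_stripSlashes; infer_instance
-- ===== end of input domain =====

-- B replaces A's index-walking while loop with one regex-substitution pass (re.sub over \\(..)); same result, idiomatic.

-- ===== PORT A =====
-- hexbyte2: non-validating hex-digit value ('0'-'9' → 0-9, anything else → 10 + ord(c) - ord('a'))
def hexbyte2 (c : Char) : Int :=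
  if (c.toNat : Int) ≥ 48 ∧ (c.toNat : Int) ≤ 57 then (c.toNat : Int) - 48
  else 10 + (c.toNat : Int) - 97

-- hexbyte(s) = (hexbyte2(s[0])*16 + hexbyte2(s[1])) % 256; only ever called on the
-- length-2 slice m[i+1:i+3] (guard i+2<l), so the fallback arm is unreachable.
def hexbyte (s : List Char) : Int :=
  match s with
  | a :: b :: _ => PySem.Int.mod (hexbyte2 a * 16 + hexbyte2 b) 256
  | _ => 0

-- the while loop of A: index i, accumulator rv; m[i] is in range by the loop guard (getD is exact there);
-- the slice m[i+1:i+3] is (drop (i+1)).take 2 (nonnegative in-range slice)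
def stripSlashesLoop (m : List Char) (l : Nat) (i : Nat) (rv : List Char) : List Char :=
  if _h : i < l then
    if m.getD i ' ' = '\\' ∧ i + 2 < l then
      stripSlashesLoop m l (i + 3) (rv ++ [Char.ofNat (hexbyte ((m.drop (i + 1)).take 2)).toNat])
    else
      stripSlashesLoop m l (i + 1) (rv ++ [m.getD i ' '])
  else rv
termination_by l - i

def stripSlashes (m : String) : String :=
  String.ofList (stripSlashesLoop m.toList m.toList.length 0 [])

-- ===== PORT B =====
-- re.sub(r'\\(..)', repl, m, flags=re.DOTALL): non-overlapping left-to-right scan,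
-- ported by hand for this fixed pattern (exact: a match is a '\\' followed by any two chars)
def stripSlashesSub : List Char → List Char
  | '\\' :: a :: b :: rest =>
      Char.ofNat (PySem.Int.mod (hexbyte2 a * 16 + hexbyte2 b) 256).toNat :: stripSlashesSub rest
  | c :: rest => c :: stripSlashesSub rest
  | [] => []

def stripSlashes_alt (m : String) : String := String.ofList (stripSlashesSub m.toList)

-- ===== PRECONDITION & SPEC =====
def Spec_stripSlashes (m : String) (out : String) : Prop := out = stripSlashes_alt m
instance (m : String) (out : String) : Decidable (Spec_stripSlashes m out) := by unfold Spec_stripSlashes; infer_instance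

-- ===== CLAIM (what is proved, stated in full; the proofs are below) =====
def Claim_equal_stripSlashes : Prop := ∀ (m : String), Dom_stripSlashes m → Spec_stripSlashes m (stripSlashes m)

-- ===== LEMMAS AND PROOFS =====

lemma sub_cons_ne (c : Char) (rest : List Char) (h : c ≠ '\\') :
    stripSlashesSub (c :: rest) = c :: stripSlashesSub rest := by
  rw [stripSlashesSub.eq_def]
  split <;> simp_all

lemma loop_eq_sub (n : Nat) : ∀ (m : List Char) (i : Nat) (rv : List Char),
    m.length - i ≤ n →
    stripSlashesLoop m m.length i rv = rv ++ stripSlashesSub (m.drop i) := by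
  induction n with
  | zero =>
    intro m i rv h
    have hge : m.length ≤ i := by omega
    unfold stripSlashesLoop
    rw [dif_neg (by omega)]
    simp [List.drop_eq_nil_of_le hge, stripSlashesSub]
  | succ n ih =>
    intro m i rv h
    unfold stripSlashesLoop
    by_cases hi : i < m.length
    · rw [dif_pos hi]
      have hdi : m.drop i = m[i] :: m.drop (i + 1) := List.drop_eq_getElem_cons hi
      by_cases hg : m.getD i ' ' = '\\' ∧ i + 2 < m.length
      · rw [if_pos hg]
        obtain ⟨hbs, hlt⟩ := hg
        have h1 : i + 1 < m.length := by omega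
        have hd1 : m.drop (i + 1) = m[i + 1] :: m.drop (i + 2) := List.drop_eq_getElem_cons h1
        have hd2 : m.drop (i + 2) = m[i + 2] :: m.drop (i + 3) := by
          simpa using List.drop_eq_getElem_cons hlt
        have hmi : m[i] = '\\' := by
          rw [List.getD_eq_getElem m ' ' hi] at hbs; exact hbs
        have htake : (m.drop (i + 1)).take 2 = [m[i + 1], m[i + 2]] := by
          rw [hd1, hd2]; rfl
        rw [ih m (i + 3) _ (by omega), htake, hdi, hmi, hd1, hd2]
        simp only [stripSlashesSub, hexbyte, List.append_assoc, List.cons_append,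
          List.nil_append]
      · rw [if_neg hg]
        rw [ih m (i + 1) _ (by omega)]
        have hmiD : m.getD i ' ' = m[i] := List.getD_eq_getElem m ' ' hi
        rw [hdi, hmiD]
        by_cases hbs : m[i] = '\\'
        · -- backslash with fewer than two following chars: emitted literally by both
          have hlen : ¬ i + 2 < m.length := fun hc => hg ⟨by rw [hmiD, hbs], hc⟩
          have hshort : m.drop (i + 1) = [] ∨ ∃ x, m.drop (i + 1) = [x] := by
            have hlen1 : (m.drop (i + 1)).length ≤ 1 := by
              simp only [List.length_drop]; omega
            cases hdd : m.drop (i + 1) with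
            | nil => exact Or.inl rfl
            | cons x t =>
              cases t with
              | nil => exact Or.inr ⟨x, rfl⟩
              | cons y t' => rw [hdd] at hlen1; simp at hlen1
          rcases hshort with h0 | ⟨x, h1⟩
          · rw [h0, hbs]
            simp only [stripSlashesSub, List.append_assoc, List.cons_append, List.nil_append]
          · rw [h1, hbs]
            simp only [stripSlashesSub, List.append_assoc, List.cons_append, List.nil_append]
        · rw [sub_cons_ne _ _ hbs]
          simp only [List.append_assoc, List.cons_append, List.nil_append]
    · rw [dif_neg hi]
      have hge : m.length ≤ i := by omega
      simp [List.drop_eq_nil_of_le hge, stripSlashesSub]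

-- ===== VERDICT (by name: the statement is the Claim_ definition above) =====
theorem stripSlashes_spec : Claim_equal_stripSlashes := by
  intro m _
  unfold Spec_stripSlashes stripSlashes stripSlashes_alt
  rw [loop_eq_sub m.toList.length m.toList 0 [] (by omega)]
  simp
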